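-- pv_equiv track=rewrite | github.com/Brunopezman/Algoritmos-y-Programacion-I | Ejercicios guia/6. Cadenas de caracteres/6.6.py | devolver_siguiente_vocal
-- ===== SOURCE A (Python) =====
-- def devolver_siguiente_vocal(s:str):
--
--     resultado = ''
--     vocales = 'aeiouAEIOU'
--
--     for caracter in s:
--
--         if caracter in vocales:
--             posicion = vocales.index(caracter)
--             siguiente_vocal = vocales[(posicion + 1) % len(vocales)]
--             resultado += siguiente_vocal
--         else:
--             resultado += caracter
--
--     return resultado
-- ===== SOURCE B (Python) =====
-- def devolver_siguiente_vocal(s: str):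
--     # Staged per-vowel passes: for each vowel v (with its successor nxt in the
--     # cycle), sweep once and replace positions where the ORIGINAL string has v.
--     # Reading from the original avoids cascading (a->e->i).
--     vocales = 'aeiouAEIOU'
--     pares = list(zip(vocales, vocales[1:] + vocales[0]))
--     out = list(s)
--     for v, nxt in pares:
--         out = [nxt if o == v else c for o, c in zip(s, out)]
--     return ''.join(out)
-- ===== Notes on version B (the rewrite author's own statement) =====
-- stated objective: alternative
-- what changed: Replaces A's single per-character loop (membership test + .index + modular lookup per char) by ten staged passes, one per vowel: each pass substitutes that one vowel's successor at the positions where the original string holds it, reading from the original to avoid cascading.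
import Mathlib
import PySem

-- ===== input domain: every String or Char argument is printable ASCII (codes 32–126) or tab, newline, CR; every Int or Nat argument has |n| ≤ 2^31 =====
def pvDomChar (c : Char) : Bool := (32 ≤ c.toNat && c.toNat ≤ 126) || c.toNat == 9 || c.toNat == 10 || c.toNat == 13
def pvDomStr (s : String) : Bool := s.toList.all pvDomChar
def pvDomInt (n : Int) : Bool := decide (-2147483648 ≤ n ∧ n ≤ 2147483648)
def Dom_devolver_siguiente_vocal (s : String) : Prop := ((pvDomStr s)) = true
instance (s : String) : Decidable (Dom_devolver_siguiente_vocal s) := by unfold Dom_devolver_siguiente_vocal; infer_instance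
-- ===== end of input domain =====

-- B replaces A's single per-character loop (membership + .index + modular lookup) with ten
-- staged passes, one per vowel, each substituting that vowel's successor at the positions
-- where the ORIGINAL string holds it (reading the original avoids cascading).
-- ===== PORT A =====
def devolver_siguiente_vocal (s : String) : String :=
  let vocales : List Char := "aeiouAEIOU".toList
  String.ofList (s.toList.foldl (fun resultado caracter =>
    if caracter ∈ vocales then
      let posicion : Nat := (PySem.List.index? vocales caracter).getD 0
      let siguiente_vocal : Char :=
        (PySem.List.pyGet? vocales (PySem.Int.mod ((posicion : Int) + 1) (vocales.length : Int))).getD caracter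
      resultado ++ [siguiente_vocal]
    else resultado ++ [caracter]) [])

-- ===== PORT B =====
def devolver_siguiente_vocal_alt (s : String) : String :=
  let vocales : List Char := "aeiouAEIOU".toList
  let pares : List (Char × Char) := List.zip vocales (vocales.drop 1 ++ [vocales.headD ' '])
  String.ofList (pares.foldl (fun out p =>
    (List.zip s.toList out).map (fun q => if q.1 = p.1 then p.2 else q.2)) s.toList)

-- ===== PRECONDITION & SPEC =====
def Spec_devolver_siguiente_vocal (s : String) (out : String) : Prop := out = devolver_siguiente_vocal_alt s
instance (s : String) (out : String) : Decidable (Spec_devolver_siguiente_vocal s out) := by unfold Spec_devolver_siguiente_vocal; infer_instance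

-- ===== CLAIM (what is proved, stated in full; the proofs are below) =====
def Claim_equal_devolver_siguiente_vocal : Prop := ∀ (s : String), Dom_devolver_siguiente_vocal s → Spec_devolver_siguiente_vocal s (devolver_siguiente_vocal s)

-- ===== LEMMAS AND PROOFS =====

-- A's per-character result function.
def pvF (c : Char) : Char :=
  if c ∈ ("aeiouAEIOU".toList) then
    (PySem.List.pyGet? ("aeiouAEIOU".toList)
      (PySem.Int.mod (((PySem.List.index? ("aeiouAEIOU".toList) c).getD 0 : Int) + 1)
        (("aeiouAEIOU".toList).length : Int))).getD c
  else c

lemma foldl_shape (l : List Char) (acc : List Char) :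
    l.foldl (fun resultado caracter =>
      if caracter ∈ ("aeiouAEIOU".toList) then
        resultado ++ [(PySem.List.pyGet? ("aeiouAEIOU".toList)
          (PySem.Int.mod (((PySem.List.index? ("aeiouAEIOU".toList) caracter).getD 0 : Int) + 1)
            (("aeiouAEIOU".toList).length : Int))).getD caracter]
      else resultado ++ [caracter]) acc = acc ++ l.map pvF := by
  induction l generalizing acc with
  | nil => simp
  | cons c t ih =>
      rw [List.foldl_cons, ih]
      by_cases h : c ∈ ("aeiouAEIOU".toList)
      · rw [if_pos h]
        have hc : pvF c = (PySem.List.pyGet? ("aeiouAEIOU".toList)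
            (PySem.Int.mod (((PySem.List.index? ("aeiouAEIOU".toList) c).getD 0 : Int) + 1)
              (("aeiouAEIOU".toList).length : Int))).getD c := by
          unfold pvF; rw [if_pos h]
        rw [List.map_cons, ← hc]; simp
      · rw [if_neg h]
        have hc : pvF c = c := by unfold pvF; rw [if_neg h]
        rw [List.map_cons, hc]; simp

-- composing one staged pass onto an already-collapsed previous pass over the same list
lemma pass_map (f : Char → Char) (v n : Char) :
    ∀ (a : List Char),
    (List.zip a (a.map f)).map (fun q => if q.1 = v then n else q.2)
    = a.map (fun c => if c = v then n else f c) := by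
  intro a
  induction a with
  | nil => simp
  | cons x xs ih => simp [ih]

lemma zip_self_map (g : Char × Char → Char) :
    ∀ (a : List Char), (List.zip a a).map g = a.map (fun c => g (c, c)) := by
  intro a
  induction a with
  | nil => simp
  | cons x xs ih => simp [ih]

lemma pointwise (c : Char) :
    (if c = 'U' then 'a' else if c = 'O' then 'U' else if c = 'I' then 'O'
     else if c = 'E' then 'I' else if c = 'A' then 'E' else if c = 'u' then 'A'
     else if c = 'o' then 'u' else if c = 'i' then 'o' else if c = 'e' then 'i'
     else if c = 'a' then 'e' else c) = pvF c := by
  by_cases h : c ∈ (['a','e','i','o','u','A','E','I','O','U'] : List Char)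
  · fin_cases h <;> decide
  · simp only [List.mem_cons, not_or, List.not_mem_nil, not_false_iff, and_true] at h
    obtain ⟨h1,h2,h3,h4,h5,h6,h7,h8,h9,h10⟩ := h
    have hm : c ∉ ("aeiouAEIOU".toList) := by
      intro hc
      have : ("aeiouAEIOU".toList) = ['a','e','i','o','u','A','E','I','O','U'] := rfl
      rw [this] at hc
      simp [h1,h2,h3,h4,h5,h6,h7,h8,h9,h10] at hc
    unfold pvF
    rw [if_neg hm]
    simp [h1,h2,h3,h4,h5,h6,h7,h8,h9,h10]

-- ===== VERDICT (by name: the statement is the Claim_ definition above) =====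
theorem devolver_siguiente_vocal_spec : Claim_equal_devolver_siguiente_vocal := by
  intro s _
  show devolver_siguiente_vocal s = devolver_siguiente_vocal_alt s
  simp only [devolver_siguiente_vocal, devolver_siguiente_vocal_alt]
  rw [foldl_shape]
  have hp : List.zip ("aeiouAEIOU".toList)
      (("aeiouAEIOU".toList).drop 1 ++ [("aeiouAEIOU".toList).headD ' '])
      = [('a','e'),('e','i'),('i','o'),('o','u'),('u','A'),
         ('A','E'),('E','I'),('I','O'),('O','U'),('U','a')] := by decide
  rw [hp]
  simp only [List.foldl_cons, List.foldl_nil, List.nil_append]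
  -- the innermost pass is already of the shape (zip a a).map g; collapse the other nine
  simp only [zip_self_map, pass_map]
  congr 1
  exact (List.map_congr_left (fun c _ => pointwise c)).symm
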